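-- pv_equiv track=rewrite | github.com/SleeplessChallenger/Leetcode | Blind_75/Strings.py | func
-- ===== SOURCE A (Python) =====
-- def func(string, i, j):
--     # we start from 0 as we are okay
--     # when counting `odd` to have 1,
--     # but when counting `even`: we
--     # may not have a palindrome
--     curr = 0
--     while i >= 0 and j < len(string):
--         if string[i] != string[j]:
--             break
--
--         curr += 1
--         i -= 1
--         j += 1
--
--
--     return curr
--
--     l = 0
--     c_frequency = {}
--     longest_str_len = 0
--     for r in range(len(s)):
--
--         if not s[r] in c_frequency:
--             c_frequency[s[r]] = 0
--         c_frequency[s[r]] += 1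
--
--         # Replacements cost = cells count between left and right - highest frequency
--         cells_count = r - l + 1
--         if cells_count - max(c_frequency.values()) <= k:
--             longest_str_len = max(longest_str_len, cells_count)
--
--         else:
--             c_frequency[s[l]] -= 1
--             if not c_frequency[s[l]]:
--                 c_frequency.pop(s[l])
--             l += 1
--
--     return longest_str_len
-- ===== SOURCE B (Python) =====
-- from itertools import takewhile
--
-- def func(string, i, j):
--     left = string[:i+1][::-1] if i >= 0 else ''
--     right = string[j:]
--     return sum(1 for _ in takewhile(lambda p: p[0] == p[1], zip(left, right)))
-- ===== Notes on version B (the rewrite author's own statement) =====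
-- stated objective: simpler
-- what changed: Replaces the two diverging index pointers and mutable counter with two materialized slices (reversed prefix up to i, suffix from j) whose matching-prefix length is counted by takewhile over zip.
-- intended difference: For negative j in [-len,0) where the whole wrapped overlap s[i+j+1..i] matches s[len+j:] and i+j>=0 with s[i+j]==s[0], A's negative-index wraparound jumps from the last character back to index 0 and keeps counting (e.g. 2 on ('bb',1,-1)), while B stops at the end of the suffix slice (1 there), which is the intended behaviour since a palindrome expansion should never wrap around the string. — e.g. on func("bb", 1, -1): A returns 2, B returns 1
import Mathlib
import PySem

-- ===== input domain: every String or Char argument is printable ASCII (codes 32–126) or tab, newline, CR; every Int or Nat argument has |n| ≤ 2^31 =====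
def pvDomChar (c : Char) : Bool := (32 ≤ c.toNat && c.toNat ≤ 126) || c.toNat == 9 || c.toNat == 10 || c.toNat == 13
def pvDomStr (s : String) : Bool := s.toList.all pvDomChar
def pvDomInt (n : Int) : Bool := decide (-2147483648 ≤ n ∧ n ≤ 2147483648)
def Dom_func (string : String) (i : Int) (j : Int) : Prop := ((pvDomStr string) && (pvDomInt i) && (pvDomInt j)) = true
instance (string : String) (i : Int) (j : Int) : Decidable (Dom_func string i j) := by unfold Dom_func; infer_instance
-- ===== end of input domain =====

-- B replaces A's two diverging index pointers with two materialized slices (reversed prefix,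
-- suffix) compared pairwise via takewhile over zip; B intentionally does not reproduce A's
-- negative-index wraparound past the end of the string (see D_func below).


-- ===== PORT A =====
-- the while loop: i walks left, j walks right, curr counts matching pairs; string[i]/string[j]
-- are Python indexing via PySem.List.pyGet? (negative wraparound; none = IndexError, which
-- Pre_func excludes, so the `_, _` branch is never reached on admitted inputs)
def funcLoop (s : List Char) (i : Int) (j : Int) (curr : Int) : Int :=
  if h : 0 ≤ i ∧ j < (s.length : Int) then
    match PySem.List.pyGet? s i, PySem.List.pyGet? s j with
    | some a, some b => if a ≠ b then curr else funcLoop s (i - 1) (j + 1) (curr + 1)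
    | _, _ => curr
  else curr
termination_by (i + 1).toNat
decreasing_by omega

def func (string : String) (i : Int) (j : Int) : Int :=
  funcLoop string.toList i j 0

-- ===== PORT B =====
def func_alt (string : String) (i : Int) (j : Int) : Int :=
  let left : List Char :=                              -- string[:i+1][::-1] if i >= 0 else ''
    if 0 ≤ i then
      (PySem.List.slice? (PySem.List.slice string.toList none (some (i + 1))) none none (-1)).getD []
    else []
  let right : List Char := PySem.List.slice string.toList (some j) none   -- string[j:]
  (((left.zip right).takeWhile (fun p => p.1 == p.2)).map (fun _ => (1 : Int))).sum
                                                       -- sum(1 for _ in takewhile(eq, zip(left, right)))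

-- ===== PRECONDITION & SPEC =====
-- Pre_ excludes exactly the inputs where A raises IndexError: the loop is entered
-- (i ≥ 0 and j < len) with i past the end or j below -len.
def Pre_func (string : String) (i : Int) (j : Int) : Prop :=
  i < 0 ∨ (string.toList.length : Int) ≤ j ∨
    (i < (string.toList.length : Int) ∧ -(string.toList.length : Int) ≤ j)
instance (string : String) (i : Int) (j : Int) : Decidable (Pre_func string i j) := by
  unfold Pre_func; infer_instance

def pvWitness_func : String × Int × Int := ("aba", 1, 1)

-- For -len ≤ j < 0 with 0 ≤ i < len, i+j ≥ 0, the whole wrapped overlap matching and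
-- s[i+j] = s[0], A's negative-index wraparound jumps from the last character back to
-- index 0 and keeps counting, while B stops at the end of the suffix slice; B's value is
-- intended, since a palindrome expansion should never wrap around the string.
def D_func (string : String) (i : Int) (j : Int) : Prop :=
  let s := string.toList
  j < 0 ∧ 0 ≤ i + j ∧
  (s ++ s.take 1).drop (s.length + j).toNat <+: (s.take (i + 1).toNat).reverse
instance (string : String) (i : Int) (j : Int) : Decidable (D_func string i j) := by
  unfold D_func; infer_instance

def Spec_func (string : String) (i : Int) (j : Int) (out : Int) : Prop :=
  ¬ D_func string i j → out = func_alt string i j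
instance (string : String) (i : Int) (j : Int) (out : Int) : Decidable (Spec_func string i j out) := by
  unfold Spec_func; infer_instance

def pvDiffWitness_func : String × Int × Int := ("bb", 1, -1)
def pvDiffWitnessOut_func : Int × Int := (2, 1)

-- ===== CLAIM (what is proved, stated in full; the proofs are below) =====
def Claim_unchanged_func : Prop := ∀ (string : String) (i : Int) (j : Int),
  Dom_func string i j → Pre_func string i j → Spec_func string i j (func string i j)
def Claim_changed_func : Prop :=
  Dom_func (pvDiffWitness_func.1) (pvDiffWitness_func.2.1) (pvDiffWitness_func.2.2) ∧
  Pre_func (pvDiffWitness_func.1) (pvDiffWitness_func.2.1) (pvDiffWitness_func.2.2) ∧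
  D_func (pvDiffWitness_func.1) (pvDiffWitness_func.2.1) (pvDiffWitness_func.2.2) ∧
  func (pvDiffWitness_func.1) (pvDiffWitness_func.2.1) (pvDiffWitness_func.2.2) = pvDiffWitnessOut_func.1 ∧
  func_alt (pvDiffWitness_func.1) (pvDiffWitness_func.2.1) (pvDiffWitness_func.2.2) = pvDiffWitnessOut_func.2 ∧
  pvDiffWitnessOut_func.1 ≠ pvDiffWitnessOut_func.2
def Claim_exact_func : Prop := ∀ (string : String) (i : Int) (j : Int),
  Dom_func string i j → Pre_func string i j → D_func string i j →
  func string i j ≠ func_alt string i j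

-- ===== LEMMAS AND PROOFS =====
def mlen (l r : List Char) : Int :=
  (((l.zip r).takeWhile (fun p => p.1 == p.2)).length : Int)

theorem mlen_nil_left (r : List Char) : mlen [] r = 0 := by simp [mlen]
theorem mlen_nil_right (l : List Char) : mlen l [] = 0 := by simp [mlen]
theorem mlen_cons (a b : Char) (l r : List Char) :
    mlen (a :: l) (b :: r) = if a = b then 1 + mlen l r else 0 := by
  by_cases h : a = b <;> simp [mlen, h] <;> omega

theorem pyGet?_pos (s : List Char) (i : Int) (h0 : 0 ≤ i) (h1 : i < (s.length:Int)) :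
    PySem.List.pyGet? s i = s[i.toNat]? := by
  unfold PySem.List.pyGet? PySem.List.pyIdx?
  rw [if_pos h0, if_pos h1]; simp
theorem pyGet?_neg (s : List Char) (j : Int) (h0 : -(s.length:Int) ≤ j) (h1 : j < 0) :
    PySem.List.pyGet? s j = s[((s.length:Int) + j).toNat]? := by
  unfold PySem.List.pyGet? PySem.List.pyIdx?
  rw [if_neg (by omega), if_pos h0]
  have h : s.length - (-j).toNat = ((s.length:Int) + j).toNat := by omega
  rw [h]; simp
theorem take_rev_cons (s : List Char) (i : Int) (h0 : 0 ≤ i) (h1 : i < (s.length:Int)) :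
    (s.take (i+1).toNat).reverse = s[i.toNat]'(by omega) :: (s.take i.toNat).reverse := by
  have h : (i+1).toNat = i.toNat + 1 := by omega
  rw [h, List.take_add_one, List.reverse_append]
  simp [List.getElem?_eq_getElem (by omega : i.toNat < s.length)]

theorem funcLoop_exit (s : List Char) (i j curr : Int) (h : ¬(0 ≤ i ∧ j < (s.length : Int))) :
    funcLoop s i j curr = curr := by
  rw [funcLoop, dif_neg h]
theorem funcLoop_step (s : List Char) (i j curr : Int) (h : 0 ≤ i ∧ j < (s.length : Int))
    (a b : Char) (ha : PySem.List.pyGet? s i = some a) (hb : PySem.List.pyGet? s j = some b) :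
    funcLoop s i j curr = if a ≠ b then curr else funcLoop s (i - 1) (j + 1) (curr + 1) := by
  rw [funcLoop, dif_pos h, ha, hb]

theorem funcLoop_ge (s : List Char) (i j curr : Int) : curr ≤ funcLoop s i j curr := by
  induction i, j, curr using funcLoop.induct s with
  | case1 i j curr h a b hb ha hne => rw [funcLoop_step s i j curr h a b ha hb, if_pos hne]
  | case2 i j curr h a b hb ha hne ih =>
      rw [funcLoop_step s i j curr h a b ha hb, if_neg hne]; omega
  | case3 i j curr h hm =>
      rw [funcLoop, dif_pos h]
      cases hpi : PySem.List.pyGet? s i with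
      | none => simp
      | some a =>
        cases hpj : PySem.List.pyGet? s j with
        | none => simp
        | some b => exact (hm a b hpi hpj).elim
  | case4 i j curr h => rw [funcLoop_exit s i j curr h]


theorem funcLoop_oob (s : List Char) (i j curr : Int) (h : 0 ≤ i ∧ j < (s.length : Int))
    (hm : PySem.List.pyGet? s i = none ∨ PySem.List.pyGet? s j = none) :
    funcLoop s i j curr = curr := by
  rw [funcLoop, dif_pos h]
  cases hpi : PySem.List.pyGet? s i with
  | none => simp
  | some a =>
    cases hpj : PySem.List.pyGet? s j with
    | none => simp
    | some b => simp [hpi, hpj] at hm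

theorem funcLoop_shift (s : List Char) (i j k : Int) :
    ∀ curr, funcLoop s i j curr = curr + funcLoop s i j 0 := by
  induction i, j, k using funcLoop.induct s with
  | case1 i j _ h a b hb ha hne =>
      intro c
      rw [funcLoop_step s i j c h a b ha hb, if_pos hne,
          funcLoop_step s i j 0 h a b ha hb, if_pos hne]
      omega
  | case2 i j _ h a b hb ha hne ih =>
      intro c
      rw [funcLoop_step s i j c h a b ha hb, if_neg hne,
          funcLoop_step s i j 0 h a b ha hb, if_neg hne, ih (c+1), ih (0+1)]
      omega
  | case3 i j _ h hm =>
      intro c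
      cases hpi : PySem.List.pyGet? s i with
      | none => rw [funcLoop_oob s i j c h (Or.inl hpi), funcLoop_oob s i j 0 h (Or.inl hpi)]; omega
      | some a =>
        cases hpj : PySem.List.pyGet? s j with
        | none => rw [funcLoop_oob s i j c h (Or.inr hpj), funcLoop_oob s i j 0 h (Or.inr hpj)]; omega
        | some b => exact (hm a b hpi hpj).elim
  | case4 i j _ h =>
      intro c
      rw [funcLoop_exit s i j c h, funcLoop_exit s i j 0 h]; omega

theorem drop_cons_getElem (s : List Char) (m : Nat) (h : m < s.length) :
    s.drop m = s[m] :: s.drop (m+1) := List.drop_eq_getElem_cons h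

theorem funcLoop_nonneg (s : List Char) (i j k : Int) :
    ∀ curr, 0 ≤ i → i < (s.length : Int) → 0 ≤ j →
      funcLoop s i j curr = curr + mlen ((s.take (i + 1).toNat).reverse) (s.drop j.toNat) := by
  induction i, j, k using funcLoop.induct s with
  | case1 i j _ h a b hb ha hne =>
      intro c h0 h1 h2
      rw [funcLoop_step s i j c h a b ha hb, if_pos hne]
      rw [pyGet?_pos s i h0 h1] at ha
      rw [pyGet?_pos s j h2 h.2] at hb
      rw [take_rev_cons s i h0 h1, drop_cons_getElem s j.toNat (by omega)]
      rw [List.getElem?_eq_getElem (by omega : i.toNat < s.length)] at ha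
      rw [List.getElem?_eq_getElem (by omega : j.toNat < s.length)] at hb
      rw [mlen_cons, if_neg (by simp_all)]
      omega
  | case2 i j _ h a b hb ha hne ih =>
      intro c h0 h1 h2
      rw [funcLoop_step s i j c h a b ha hb, if_neg hne]
      rw [pyGet?_pos s i h0 h1] at ha
      rw [pyGet?_pos s j h2 h.2] at hb
      rw [List.getElem?_eq_getElem (by omega : i.toNat < s.length)] at ha
      rw [List.getElem?_eq_getElem (by omega : j.toNat < s.length)] at hb
      rw [take_rev_cons s i h0 h1, drop_cons_getElem s j.toNat (by omega)]
      rw [mlen_cons, if_pos (by simp_all)]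
      by_cases hi0 : i = 0
      · subst hi0
        rw [funcLoop_exit s (0 - 1) (j+1) (c+1) (by omega)]
        simp [mlen_nil_left]
      · rw [ih (c+1) (by omega) (by omega) (by omega)]
        have e1 : (i - 1 + 1).toNat = i.toNat := by omega
        have e2 : (j + 1).toNat = j.toNat + 1 := by omega
        rw [e1, e2]
        omega
  | case3 i j _ h hm =>
      intro c h0 h1 h2
      exact ((by
        rw [pyGet?_pos s i h0 h1, pyGet?_pos s j h2 h.2] at hm
        rw [List.getElem?_eq_getElem (by omega : i.toNat < s.length),
            List.getElem?_eq_getElem (by omega : j.toNat < s.length)] at hm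
        exact hm _ _ rfl rfl) : False).elim
  | case4 i j _ h =>
      intro c h0 h1 h2
      rw [funcLoop_exit s i j c h]
      have : s.drop j.toNat = [] := List.drop_eq_nil_of_le (by omega)
      rw [this, mlen_nil_right]
      omega

def fullWrap (s : List Char) (i : Int) (j : Int) : Bool :=
  decide (-j < i + 1) &&
  (List.range (-j).toNat).all (fun k =>
    s.getD (i - k).toNat ' ' == s.getD ((s.length : Int) + j + k).toNat ' ')

theorem getD_elem (s : List Char) (m : Nat) (h : m < s.length) :
    s.getD m ' ' = s[m] := List.getD_eq_getElem s ' ' h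

theorem fullWrap_shift (s : List Char) (i j : Int) (h0 : 0 ≤ i) (h1 : i < (s.length : Int))
    (h2 : -(s.length : Int) ≤ j) (h3 : j + 1 < 0)
    (heq : s.getD i.toNat ' ' = s.getD ((s.length : Int) + j).toNat ' ') :
    fullWrap s (i - 1) (j + 1) = fullWrap s i j := by
  rw [Bool.eq_iff_iff]
  simp only [fullWrap, Bool.and_eq_true, decide_eq_true_eq, List.all_eq_true, List.mem_range,
    beq_iff_eq]
  constructor
  · rintro ⟨hlt, hall⟩
    refine ⟨by omega, ?_⟩
    intro k hk
    rcases Nat.eq_zero_or_pos k with rfl | hkpos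
    · simpa using heq
    · have := hall (k - 1) (by omega)
      have e0 : ((k - 1 : Nat) : Int) = (k : Int) - 1 := by omega
      rw [e0] at this
      have e1 : (i - 1 - ((k:Int)-1)) = i - k := by ring
      have e2 : ((s.length : Int) + (j+1) + ((k:Int)-1)) = (s.length : Int) + j + k := by ring
      rwa [e1, e2] at this
  · rintro ⟨hlt, hall⟩
    refine ⟨by omega, ?_⟩
    intro k hk
    have := hall (k + 1) (by omega)
    have e0 : ((k + 1 : Nat) : Int) = (k : Int) + 1 := by omega
    rw [e0] at this
    have e1 : (i - ((k:Int)+1)) = i - 1 - k := by ring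
    have e2 : ((s.length : Int) + j + ((k:Int)+1)) = (s.length : Int) + (j+1) + k := by ring
    rwa [e1, e2] at this

theorem funcLoop_wrap (s : List Char) (i j k : Int) :
    ∀ curr, 0 ≤ i → i < (s.length : Int) → -(s.length : Int) ≤ j → j < 0 →
      funcLoop s i j curr = curr + mlen ((s.take (i + 1).toNat).reverse)
          (s.drop (((s.length : Int)) + j).toNat)
        + (if fullWrap s i j then funcLoop s (i + j) 0 0 else 0) := by
  induction i, j, k using funcLoop.induct s with
  | case1 i j _ h a b hb ha hne =>
      intro c h0 h1 h2 h3
      rw [funcLoop_step s i j c h a b ha hb, if_pos hne]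
      rw [pyGet?_pos s i h0 h1] at ha
      rw [pyGet?_neg s j h2 h3] at hb
      rw [List.getElem?_eq_getElem (by omega : i.toNat < s.length)] at ha
      rw [List.getElem?_eq_getElem (by omega : ((s.length:Int) + j).toNat < s.length)] at hb
      rw [take_rev_cons s i h0 h1, drop_cons_getElem s ((s.length:Int) + j).toNat (by omega)]
      rw [mlen_cons, if_neg (by simp_all)]
      have hfw : fullWrap s i j = false := by
        simp only [fullWrap, Bool.and_eq_false_iff]
        right
        rw [List.all_eq_false]
        refine ⟨0, by rw [List.mem_range]; omega, ?_⟩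
        simp only [beq_iff_eq]
        have e1 : (i - (0:Nat) : Int) = i := by push_cast; ring
        have e2 : ((s.length : Int) + j + (0:Nat)) = (s.length : Int) + j := by push_cast; ring
        rw [e1, e2, getD_elem s i.toNat (by omega), getD_elem s ((s.length:Int)+j).toNat (by omega)]
        simp_all
      rw [hfw]
      simp
  | case2 i j _ h a b hb ha hne ih =>
      intro c h0 h1 h2 h3
      rw [funcLoop_step s i j c h a b ha hb, if_neg hne]
      rw [pyGet?_pos s i h0 h1] at ha
      rw [pyGet?_neg s j h2 h3] at hb
      rw [List.getElem?_eq_getElem (by omega : i.toNat < s.length)] at ha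
      rw [List.getElem?_eq_getElem (by omega : ((s.length:Int) + j).toNat < s.length)] at hb
      have hab : s[i.toNat] = s[((s.length:Int) + j).toNat] := by simp_all
      rw [take_rev_cons s i h0 h1, drop_cons_getElem s ((s.length:Int) + j).toNat (by omega)]
      rw [mlen_cons, if_pos hab]
      by_cases hi0 : i = 0
      · subst hi0
        rw [funcLoop_exit s (0 - 1) (j+1) (c+1) (by omega)]
        have hfw : fullWrap s 0 j = false := by
          simp only [fullWrap, Bool.and_eq_false_iff]
          left
          simp; omega
        rw [hfw]
        simp [mlen_nil_left]
      · by_cases hj1 : j + 1 = 0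
        · -- j = -1 : loop continues at (i-1, 0); slice side is exhausted
          have hj : j = -1 := by omega
          subst hj
          have e3 : ((s.length:Int) + -1).toNat + 1 = s.length := by omega
          rw [e3, List.drop_length, mlen_nil_right]
          have hfw : fullWrap s i (-1) = true := by
            simp only [fullWrap, Bool.and_eq_true, decide_eq_true_eq, List.all_eq_true]
            refine ⟨by omega, ?_⟩
            intro m hm
            simp at hm
            have : m = 0 := by omega
            subst this
            have e1 : (i - (0:Nat) : Int) = i := by push_cast; ring
            have e2 : ((s.length : Int) + -1 + (0:Nat)) = (s.length : Int) + -1 := by push_cast; ring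
            rw [e1, e2, getD_elem s i.toNat (by omega), getD_elem s ((s.length:Int) + -1).toNat (by omega)]
            simp [hab]
          rw [hfw, if_pos rfl]
          rw [funcLoop_shift s (i-1) (-1+1) 0 (c+1)]
          have e4 : (-1 + 1 : Int) = 0 := by ring
          have e5 : (i + -1 : Int) = i - 1 := by ring
          rw [e4, e5]
          omega
        · -- j + 1 < 0 : induction applies
          rw [ih (c+1) (by omega) (by omega) (by omega) (by omega)]
          have e1 : (i - 1 + 1).toNat = i.toNat := by omega
          have e2 : ((s.length:Int) + (j + 1)).toNat = ((s.length:Int) + j).toNat + 1 := by omega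
          rw [e1, e2]
          rw [fullWrap_shift s i j h0 h1 h2 (by omega)
            (by rw [getD_elem s i.toNat (by omega), getD_elem s ((s.length:Int)+j).toNat (by omega)]; exact hab)]
          have e3 : (i - 1 + (j + 1) : Int) = i + j := by ring
          rw [e3]
          omega
  | case3 i j _ h hm =>
      intro c h0 h1 h2 h3
      exact ((by
        rw [pyGet?_pos s i h0 h1, pyGet?_neg s j h2 h3] at hm
        rw [List.getElem?_eq_getElem (by omega : i.toNat < s.length),
            List.getElem?_eq_getElem (by omega : ((s.length:Int)+j).toNat < s.length)] at hm
        exact hm _ _ rfl rfl) : False).elim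
  | case4 i j _ h =>
      intro c h0 h1 h2 h3
      exact absurd ⟨h0, by omega⟩ h



theorem sum_ones (l : List (Char × Char)) : (l.map (fun _ => (1:Int))).sum = (l.length : Int) := by
  rw [PySem.List.sum_map_const_int]; ring

theorem func_alt_eq_mlen (s : String) (i j : Int) (hi : 0 ≤ i) :
    func_alt s i j = mlen ((s.toList.take (i + 1).toNat).reverse)
      (s.toList.drop (PySem.List.clampIdx s.toList.length j)) := by
  unfold func_alt
  rw [if_pos hi, PySem.List.slice_to s.toList (by omega : (0:Int) ≤ i + 1),
      PySem.List.slice?_none_none_neg_one, Option.getD_some,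
      PySem.List.slice_some_none, sum_ones, mlen]

theorem func_alt_neg (s : String) (i j : Int) (hi : i < 0) : func_alt s i j = 0 := by
  unfold func_alt
  rw [if_neg (by omega)]
  simp

theorem clamp_drop_nonneg (s : List Char) (j : Int) (h : 0 ≤ j) :
    s.drop (PySem.List.clampIdx s.length j) = s.drop j.toNat := by
  have e : PySem.List.clampIdx s.length j = min j.toNat s.length := by
    conv_lhs => rw [show j = ((j.toNat : Nat) : Int) by omega]
    rw [PySem.List.clampIdx_natCast]
  rw [e]
  rcases le_or_gt j.toNat s.length with hle | hgt
  · rw [Nat.min_eq_left hle]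
  · rw [Nat.min_eq_right (by omega), List.drop_length]
    exact (List.drop_eq_nil_of_le (by omega)).symm

theorem clamp_neg (s : List Char) (j : Int) (h0 : -(s.length:Int) ≤ j) (h1 : j < 0) :
    PySem.List.clampIdx s.length j = ((s.length:Int) + j).toNat := by
  have e : j = -(((-j).toNat : Nat) : Int) := by omega
  rw [e, PySem.List.clampIdx_neg_natCast _ _ (by omega)]
  omega



theorem D_bridge (s : List Char) (i j : Int) (h0 : 0 ≤ i) (h1 : i < (s.length:Int))
    (h2 : -(s.length:Int) ≤ j) (h3 : j < 0) (h4 : 0 ≤ i + j) :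
    ((s ++ s.take 1).drop ((s.length:Int) + j).toNat <+: (s.take (i + 1).toNat).reverse)
    ↔ ((∀ k ∈ List.range (-j).toNat,
          s.getD (i - k).toNat ' ' = s.getD ((s.length:Int) + j + k).toNat ' ')
       ∧ s.getD (i + j).toNat ' ' = s.getD 0 ' ') := by
  have hn : 1 ≤ s.length := by omega
  have hlen1 : ((s ++ s.take 1).drop ((s.length:Int) + j).toNat).length = (-j).toNat + 1 := by
    simp only [List.length_drop, List.length_append, List.length_take]
    omega
  have hlen2 : ((s.take (i + 1).toNat).reverse).length = (i + 1).toNat := by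
    simp only [List.length_reverse, List.length_take]
    omega
  have elL : ∀ (k : Nat) (hk : k < (-j).toNat + 1),
      ((s ++ s.take 1).drop ((s.length:Int) + j).toNat)[k]'(by omega) =
        if hlt : k < (-j).toNat then s[((s.length:Int) + j + k).toNat]'(by omega) else s[0] := by
    intro k hk
    rw [List.getElem_drop, List.getElem_append]
    split
    · next hin =>
      rw [dif_pos (by omega)]
      congr 1
      omega
    · next hin =>
      rw [dif_neg (by omega)]
      simp only [show ((s.length:Int) + j).toNat + k - s.length = 0 from by omega]
      rw [List.getElem_take]
      rfl
  have elR : ∀ (k : Nat) (hk : k < (-j).toNat + 1),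
      ((s.take (i + 1).toNat).reverse)[k]'(by omega) = s[(i - k).toNat]'(by omega) := by
    intro k hk
    rw [List.getElem_reverse, List.getElem_take]
    congr 1
    simp only [List.length_take]
    omega
  rw [List.prefix_iff_getElem]
  constructor
  · rintro ⟨hle, hel⟩
    constructor
    · intro k hk
      rw [List.mem_range] at hk
      have := hel k (by omega)
      rw [elL k (by omega), dif_pos hk, elR k (by omega)] at this
      rw [List.getD_eq_getElem s ' ' (show (i - k).toNat < s.length by omega),
          List.getD_eq_getElem s ' ' (show ((s.length:Int) + j + k).toNat < s.length by omega)]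
      exact this.symm
    · have := hel (-j).toNat (by omega)
      rw [elL (-j).toNat (by omega), dif_neg (by omega), elR (-j).toNat (by omega)] at this
      rw [List.getD_eq_getElem s ' ' (show (i + j).toNat < s.length by omega),
          List.getD_eq_getElem s ' ' (show 0 < s.length by omega)]
      simp only [show (i - (((-j).toNat : Nat) : Int)).toNat = (i + j).toNat from by omega] at this
      exact this.symm
  · rintro ⟨hall, hc⟩
    refine ⟨by omega, ?_⟩
    intro k hk
    rw [hlen1] at hk
    rw [elL k (by omega), elR k (by omega)]
    split
    · next hlt =>
      have := hall k (by rw [List.mem_range]; omega)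
      rw [List.getD_eq_getElem s ' ' (show (i - k).toNat < s.length by omega),
          List.getD_eq_getElem s ' ' (show ((s.length:Int) + j + k).toNat < s.length by omega)] at this
      exact this.symm
    · next hlt =>
      rw [List.getD_eq_getElem s ' ' (show (i + j).toNat < s.length by omega),
          List.getD_eq_getElem s ' ' (show 0 < s.length by omega)] at hc
      simp only [show (i - (k : Int)).toNat = (i + j).toNat from by omega]
      exact hc.symm

theorem main_eq (string : String) (i j : Int) (hpre : Pre_func string i j)
    (hnd : ¬ D_func string i j) : func string i j = func_alt string i j := by
  unfold func
  by_cases hi : 0 ≤ i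
  · by_cases hj : j < (string.toList.length : Int)
    · have hin : i < (string.toList.length : Int) ∧ -(string.toList.length : Int) ≤ j := by
        rcases hpre with h | h | h
        · omega
        · omega
        · exact h
      by_cases hj0 : 0 ≤ j
      · rw [funcLoop_nonneg string.toList i j 0 0 hi hin.1 hj0,
            func_alt_eq_mlen string i j hi, clamp_drop_nonneg string.toList j hj0]
        omega
      · rw [funcLoop_wrap string.toList i j 0 0 hi hin.1 hin.2 (by omega),
            func_alt_eq_mlen string i j hi, clamp_neg string.toList j hin.2 (by omega)]
        by_cases hfw : fullWrap string.toList i j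
        · have hdecomp := hfw
          simp only [fullWrap, Bool.and_eq_true, decide_eq_true_eq, List.all_eq_true,
            beq_iff_eq] at hdecomp
          obtain ⟨hlt, hall⟩ := hdecomp
          have hne : string.toList.getD (i + j).toNat ' ' ≠ string.toList.getD 0 ' ' := by
            intro hc
            exact hnd ⟨by omega, by omega,
              (D_bridge string.toList i j hi hin.1 hin.2 (by omega) (by omega)).mpr ⟨hall, hc⟩⟩
          have hx : funcLoop string.toList (i + j) 0 0 = 0 := by
            rw [funcLoop_step string.toList (i + j) 0 0 ⟨by omega, by omega⟩
                  (string.toList[(i+j).toNat]'(by omega)) (string.toList[(0:Int).toNat]'(by omega))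
                  (by rw [pyGet?_pos string.toList (i+j) (by omega) (by omega)]
                      exact List.getElem?_eq_getElem _)
                  (by rw [pyGet?_pos string.toList 0 (by omega) (by omega)]
                      exact List.getElem?_eq_getElem _),
                if_pos ?_]
            intro hc
            apply hne
            rw [getD_elem string.toList (i+j).toNat (by omega),
                getD_elem string.toList 0 (by omega)]
            simpa using hc
          rw [hfw, if_pos rfl, hx]
          omega
        · rw [if_neg (by simpa using hfw)]
          omega
    · rw [funcLoop_exit string.toList i j 0 (by omega),
          func_alt_eq_mlen string i j hi, clamp_drop_nonneg string.toList j (by omega)]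
      rw [List.drop_eq_nil_of_le (by omega), mlen_nil_right]
  · rw [funcLoop_exit string.toList i j 0 (by omega), func_alt_neg string i j (by omega)]

theorem main_tight (string : String) (i j : Int) (hpre : Pre_func string i j)
    (hd : D_func string i j) : func string i j ≠ func_alt string i j := by
  obtain ⟨h4, h5, hpfx⟩ := hd
  have h1 : 0 ≤ i := by omega
  have hbnd : i < (string.toList.length : Int) ∧ -(string.toList.length : Int) ≤ j := by
    rcases hpre with h | h | h <;> first | omega | exact h
  obtain ⟨h2, h3⟩ := hbnd
  obtain ⟨h6, h7⟩ := (D_bridge string.toList i j h1 h2 h3 h4 h5).mp hpfx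
  have hfw : fullWrap string.toList i j = true := by
    simp only [fullWrap, Bool.and_eq_true, decide_eq_true_eq, List.all_eq_true, beq_iff_eq]
    exact ⟨by omega, h6⟩
  unfold func
  rw [funcLoop_wrap string.toList i j 0 0 h1 h2 h3 h4, hfw, if_pos rfl,
      func_alt_eq_mlen string i j h1, clamp_neg string.toList j h3 h4]
  have hx : 1 ≤ funcLoop string.toList (i + j) 0 0 := by
    rw [funcLoop_step string.toList (i + j) 0 0 ⟨by omega, by omega⟩
          (string.toList[(i+j).toNat]'(by omega)) (string.toList[(0:Int).toNat]'(by omega))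
          (by rw [pyGet?_pos string.toList (i+j) (by omega) (by omega)]
              exact List.getElem?_eq_getElem _)
          (by rw [pyGet?_pos string.toList 0 (by omega) (by omega)]
              exact List.getElem?_eq_getElem _),
        if_neg ?_]
    · have := funcLoop_ge string.toList (i + j - 1) (0 + 1) (0 + 1)
      omega
    · simp only [ne_eq, not_not]
      rw [getD_elem string.toList (i+j).toNat (by omega),
          getD_elem string.toList 0 (by omega)] at h7
      simpa using h7
  omega

-- ===== VERDICT (by name: the statement is the Claim_ definition above) =====
theorem func_spec : Claim_unchanged_func := by
  intro string i j _ hpre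
  unfold Spec_func
  intro hnd
  exact main_eq string i j hpre hnd

theorem func_changed : Claim_changed_func := by
  unfold Claim_changed_func
  refine ⟨by decide, by decide, by decide, ?_, by decide, by decide⟩
  show func "bb" 1 (-1) = 2
  unfold func
  rw [funcLoop_step "bb".toList 1 (-1) 0 (by decide) 'b' 'b' (by decide) (by decide), if_neg (by decide)]
  norm_num
  rw [funcLoop_step "bb".toList 0 0 1 (by decide) 'b' 'b' (by decide) (by decide), if_neg (by decide)]
  rw [funcLoop_exit "bb".toList (0-1) (0+1) (1+1) (by decide)]
  norm_num

theorem func_tight : Claim_exact_func := by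
  intro string i j _ hpre hd
  exact main_tight string i j hpre hd
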